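-- pv_equiv track=rewrite | github.com/bair-climate-initiative/xT | training/tiling.py | zig_zag_horizontal
-- ===== SOURCE A (Python) =====
-- def zig_zag_horizontal(n):
--     context_id = 0
--     for i in range(n):
--         inner = list(range(n))
--         if i % 2 == 1:
--             inner = reversed(inner)
--         for j in inner:
--             k = {"context_id": context_id}
--             yield i, j, k
--             context_id += 1
-- ===== SOURCE B (Python) =====
-- def zig_zag_horizontal(n):
--     total = n * n if n > 0 else 0
--     for m in range(total):
--         i, p = divmod(m, n)
--         j = p if i % 2 == 0 else n - 1 - p
--         yield i, j, {"context_id": m}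
-- ===== Notes on version B (the rewrite author's own statement) =====
-- stated objective: alternative
-- what changed: Replaces the nested row loop with reversed-list construction and a running context_id counter by a single flat loop over range(n*n) that derives row, column (via divmod and row parity) and context_id directly from the flattened index.
import Mathlib
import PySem

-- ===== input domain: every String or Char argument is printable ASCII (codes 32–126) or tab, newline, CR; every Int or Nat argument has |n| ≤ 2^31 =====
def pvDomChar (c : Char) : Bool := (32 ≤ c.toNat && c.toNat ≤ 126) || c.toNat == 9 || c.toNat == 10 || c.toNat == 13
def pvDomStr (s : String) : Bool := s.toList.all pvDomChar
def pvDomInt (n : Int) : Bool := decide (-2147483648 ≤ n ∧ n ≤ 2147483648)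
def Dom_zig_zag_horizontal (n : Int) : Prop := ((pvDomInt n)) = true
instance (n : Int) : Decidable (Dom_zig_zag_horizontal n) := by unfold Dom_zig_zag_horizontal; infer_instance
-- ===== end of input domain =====

-- B replaces A's nested loops, per-row reversed-list construction and running context_id counter
-- by one flat loop over range(n*n) that derives row, column and context_id from the flat index
-- (alternative decomposition, same cost). Both are Python generators; the claim is about the
-- yielded sequence as a list.

-- ===== PORT A =====
def zig_zag_horizontal (n : Int) : List (Int × Int × (List (String × Int))) :=
  ((PySem.List.pyRange 0 n 1).foldl
    (fun (st : Int × List (Int × Int × (List (String × Int)))) i =>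
      let inner := PySem.List.pyRange 0 n 1
      let inner := if PySem.Int.mod i 2 = 1 then inner.reverse else inner
      inner.foldl (fun st j => (st.1 + 1, st.2 ++ [(i, j, [("context_id", st.1)])])) st)
    (0, [])).2

-- ===== PORT B =====
def zig_zag_horizontal_alt (n : Int) : List (Int × Int × (List (String × Int))) :=
  let total : Int := if 0 < n then n * n else 0
  (PySem.List.pyRange 0 total 1).map (fun m =>
    let i := PySem.Int.floordiv m n
    let p := PySem.Int.mod m n
    let j := if PySem.Int.mod i 2 = 0 then p else n - 1 - p
    (i, j, [("context_id", m)]))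

-- ===== PRECONDITION & SPEC =====
def Spec_zig_zag_horizontal (n : Int) (out : List (Int × Int × (List (String × Int)))) : Prop := out = zig_zag_horizontal_alt n
instance (n : Int) (out : List (Int × Int × (List (String × Int)))) : Decidable (Spec_zig_zag_horizontal n out) := by unfold Spec_zig_zag_horizontal; infer_instance

-- ===== CLAIM (what is proved, stated in full; the proofs are below) =====
def Claim_equal_zig_zag_horizontal : Prop := ∀ (n : Int), Dom_zig_zag_horizontal n → Spec_zig_zag_horizontal n (zig_zag_horizontal n)

-- ===== LEMMAS AND PROOFS =====

-- the sequence A's inner loop appends: row i, columns xs, context ids c, c+1, …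
def pvTag (i c : Int) : List Int → List (Int × Int × (List (String × Int)))
  | [] => []
  | j :: rest => (i, j, [("context_id", c)]) :: pvTag i (c + 1) rest

theorem pvTag_length (i c : Int) (xs : List Int) : (pvTag i c xs).length = xs.length := by
  induction xs generalizing c with
  | nil => rfl
  | cons j rest ih => simp [pvTag, ih]

theorem pvTag_getElem (i : Int) (xs : List Int) (c : Int) (k : Nat)
    (hk : k < xs.length) (hk' : k < (pvTag i c xs).length) :
    (pvTag i c xs)[k] = (i, xs[k], [("context_id", c + k)]) := by
  induction xs generalizing c k with
  | nil => simp at hk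
  | cons j rest ih =>
    cases k with
    | zero => simp [pvTag]
    | succ k =>
      simp only [pvTag, List.getElem_cons_succ]
      rw [ih (c + 1) k (by simpa using hk) (by simpa [pvTag] using hk')]
      simp only [Prod.mk.injEq, List.cons.injEq, true_and, and_true]
      push_cast
      ring

theorem pvInner_foldl (i : Int) (xs : List Int) (c : Int)
    (acc : List (Int × Int × (List (String × Int)))) :
    xs.foldl (fun st j => (st.1 + 1, st.2 ++ [(i, j, [("context_id", st.1)])])) (c, acc)
      = (c + xs.length, acc ++ pvTag i c xs) := by
  induction xs generalizing c acc with
  | nil => simp [pvTag]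
  | cons j rest ih =>
    simp only [List.foldl_cons, pvTag]
    rw [ih]
    congr 1
    · simp only [List.length_cons]; push_cast; ring
    · simp

-- row i of A equals the corresponding slice of B's flat map
theorem pvRow_eq (n i : Int) (hn : 0 < n) (_hi : 0 ≤ i) (_hin : i < n) :
    pvTag i (i * n)
      (if PySem.Int.mod i 2 = 1 then (PySem.List.pyRange 0 n 1).reverse
       else PySem.List.pyRange 0 n 1)
    = (PySem.List.pyRange (i * n) (i * n + n) 1).map (fun m =>
        (PySem.Int.floordiv m n,
         if PySem.Int.mod (PySem.Int.floordiv m n) 2 = 0 then PySem.Int.mod m n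
           else n - 1 - PySem.Int.mod m n,
         [("context_id", m)])) := by
  have hlen_inner : (if PySem.Int.mod i 2 = 1 then (PySem.List.pyRange 0 n 1).reverse
       else PySem.List.pyRange 0 n 1).length = n.toNat := by
    split <;> simp [PySem.List.length_pyRange_one]
  apply List.ext_getElem
  · rw [pvTag_length, hlen_inner]
    simp [PySem.List.length_pyRange_one]
  intro k hk1 hk2
  have hkn : k < n.toNat := by rw [pvTag_length, hlen_inner] at hk1; exact hk1
  have hkint : (k : Int) < n := by omega
  rw [pvTag_getElem i _ (i * n) k (by rw [hlen_inner]; exact hkn) hk1]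
  rw [List.getElem_map]
  rw [PySem.List.getElem_pyRange_one]
  have hdiv : PySem.Int.floordiv (i * n + (k : Int)) n = i := by
    rw [PySem.Int.floordiv_eq_iff_of_pos hn]
    refine ⟨le_add_of_nonneg_right (Int.natCast_nonneg k), ?_⟩
    have h2 : (i + 1) * n = i * n + n := by ring
    rw [h2]
    omega
  have hmod : PySem.Int.mod (i * n + (k : Int)) n = (k : Int) := by
    rw [PySem.Int.mod_eq_emod_of_pos hn]
    have h1 : i * n + (k : Int) = (k : Int) + n * i := by ring
    rw [h1, Int.add_mul_emod_self_left]
    exact Int.emod_eq_of_lt (Int.natCast_nonneg k) hkint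
  rw [hdiv, hmod]
  have hpar : PySem.Int.mod i 2 = i % 2 :=
    PySem.Int.mod_eq_emod_of_pos (by norm_num)
  by_cases hodd : PySem.Int.mod i 2 = 1
  · have h0 : ¬ PySem.Int.mod i 2 = 0 := by rw [hpar] at hodd ⊢; omega
    simp only [if_pos hodd, if_neg h0]
    rw [List.getElem_reverse, PySem.List.getElem_pyRange_one]
    simp only [Prod.mk.injEq, PySem.List.length_pyRange_one]
    exact ⟨trivial, by omega, trivial⟩
  · have h0 : PySem.Int.mod i 2 = 0 := by rw [hpar] at hodd ⊢; omega
    simp only [if_neg hodd, if_pos h0]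
    rw [PySem.List.getElem_pyRange_one]
    simp only [Prod.mk.injEq]
    exact ⟨trivial, by omega, trivial⟩

-- A's outer loop, started at row a with counter a*n, produces B's flat slice from a*n to n*n
theorem pvOuter (n : Int) (hn : 0 < n) :
    ∀ (fuel : Nat) (a : Int) (acc : List (Int × Int × (List (String × Int)))),
      0 ≤ a → a ≤ n → (n - a).toNat = fuel →
    ((PySem.List.pyRange a n 1).foldl
      (fun (st : Int × List (Int × Int × (List (String × Int)))) i =>
        (if PySem.Int.mod i 2 = 1 then (PySem.List.pyRange 0 n 1).reverse
         else PySem.List.pyRange 0 n 1).foldl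
          (fun st j => (st.1 + 1, st.2 ++ [(i, j, [("context_id", st.1)])])) st)
      (a * n, acc)).2
    = acc ++ (PySem.List.pyRange (a * n) (n * n) 1).map (fun m =>
        (PySem.Int.floordiv m n,
         if PySem.Int.mod (PySem.Int.floordiv m n) 2 = 0 then PySem.Int.mod m n
           else n - 1 - PySem.Int.mod m n,
         [("context_id", m)])) := by
  intro fuel
  induction fuel with
  | zero =>
    intro a acc ha hb hf
    have hna : a = n := by omega
    subst hna
    rw [PySem.List.pyRange_one_eq_nil le_rfl, PySem.List.pyRange_one_eq_nil le_rfl]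
    simp
  | succ fuel ih =>
    intro a acc ha hb hf
    have han : a < n := by omega
    have hlen' : (((if PySem.Int.mod a 2 = 1 then (PySem.List.pyRange 0 n 1).reverse
        else PySem.List.pyRange 0 n 1).length : Int)) = n := by
      split <;> simp [PySem.List.length_pyRange_one] <;> omega
    rw [PySem.List.pyRange_one_cons han]
    simp only [List.foldl_cons]
    rw [pvInner_foldl, hlen']
    rw [show a * n + n = (a + 1) * n from by ring]
    rw [ih (a + 1) _ (by omega) (by omega) (by omega)]
    rw [pvRow_eq n a hn ha han]
    rw [List.append_assoc, ← List.map_append]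
    congr 2
    rw [show (a + 1) * n = a * n + n from by ring]
    rw [← PySem.List.pyRange_one_append (a * n) (a * n + n) (n * n)
      (by nlinarith) (by nlinarith)]

-- ===== VERDICT (by name: the statement is the Claim_ definition above) =====
theorem zig_zag_horizontal_spec : Claim_equal_zig_zag_horizontal := by
  intro n _
  show zig_zag_horizontal n = zig_zag_horizontal_alt n
  by_cases hn : 0 < n
  · have h := pvOuter n hn (n - 0).toNat 0 [] le_rfl hn.le rfl
    rw [zero_mul] at h
    exact h.trans (by simp [zig_zag_horizontal_alt, if_pos hn])
  · unfold zig_zag_horizontal zig_zag_horizontal_alt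
    rw [PySem.List.pyRange_one_eq_nil (by omega : n ≤ 0)]
    simp [if_neg hn, PySem.List.pyRange_one_eq_nil le_rfl]
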